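-- pv_equiv track=rewrite | github.com/MiyukiKun/TeamGalleryBot | Helper/helper.py | parse_about
-- ===== SOURCE A (Python) =====
-- def parse_about(about):
--     unwanted_shit = ["Manga: @Manga_Gallery","Anime: @Anime_Gallery", "Group: @Anime_Discussion_Cafe", "Animes: @Anime_Gallery", "Anime:@Anime_Gallery", "Animes:@Anime_Gallery", "Group:@Anime_Discussion_Cafe", "Group: @MangaTards", "Group:@MangaTards"]
--     about = about.split("\n")
--     try:
--         for i in unwanted_shit:
--             if i in about:
--                 about.remove(i)
--     except:
--         pass
--     return "\n".join(about)
-- ===== SOURCE B (Python) =====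
-- def parse_about(about):
--     unwanted_shit = ["Manga: @Manga_Gallery","Anime: @Anime_Gallery", "Group: @Anime_Discussion_Cafe", "Animes: @Anime_Gallery", "Anime:@Anime_Gallery", "Animes:@Anime_Gallery", "Group:@Anime_Discussion_Cafe", "Group: @MangaTards", "Group:@MangaTards"]
--     remaining = set(unwanted_shit)
--     kept = []
--     for line in about.split("\n"):
--         if line in remaining:
--             remaining.discard(line)
--         else:
--             kept.append(line)
--     return "\n".join(kept)
-- ===== Notes on version B (the rewrite author's own statement) =====
-- stated objective: simpler
-- what changed: One linear pass over the lines with a shrinking set of boilerplate targets (skip a line on first match and discard the target), instead of A's per-target membership scan plus list.remove over the mutable line list.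
import Mathlib
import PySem

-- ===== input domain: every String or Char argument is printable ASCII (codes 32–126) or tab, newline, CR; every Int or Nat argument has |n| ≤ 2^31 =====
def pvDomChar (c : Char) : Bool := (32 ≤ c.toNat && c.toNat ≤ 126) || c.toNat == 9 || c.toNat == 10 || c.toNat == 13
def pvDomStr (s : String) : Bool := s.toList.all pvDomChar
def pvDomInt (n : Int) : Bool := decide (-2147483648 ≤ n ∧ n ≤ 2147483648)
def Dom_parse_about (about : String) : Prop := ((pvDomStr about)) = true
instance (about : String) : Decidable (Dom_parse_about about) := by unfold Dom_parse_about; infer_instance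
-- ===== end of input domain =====

-- ===== PORT A =====
-- B does one pass over the lines with a shrinking set of targets instead of A's per-target scan+remove; same return value (objective: simpler).
def unwanted_shit : List String := ["Manga: @Manga_Gallery", "Anime: @Anime_Gallery", "Group: @Anime_Discussion_Cafe", "Animes: @Anime_Gallery", "Anime:@Anime_Gallery", "Animes:@Anime_Gallery", "Group:@Anime_Discussion_Cafe", "Group: @MangaTards", "Group:@MangaTards"]

-- for i in unwanted_shit: if i in about: about.remove(i)  (remove is guarded by the membership test, so it never raises)
def parse_about (about : String) : String :=
  let lines := (PySem.Str.split? about "\n").getD []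
  let lines := unwanted_shit.foldl (fun ls i => if ls.contains i then (PySem.List.remove? ls i).getD ls else ls) lines
  PySem.Str.join "\n" lines

-- ===== PORT B =====
-- the single pass: skip a line on first match, discarding the matched target
def keepLines (lines : List String) (remaining : PySem.Set String) : List String :=
  match lines with
  | [] => []
  | x :: xs =>
    if PySem.Set.contains remaining x then keepLines xs (PySem.Set.discard remaining x)
    else x :: keepLines xs remaining

def parse_about_alt (about : String) : String :=
  PySem.Str.join "\n" (keepLines ((PySem.Str.split? about "\n").getD []) (PySem.Set.ofList unwanted_shit))

-- ===== PRECONDITION & SPEC =====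
def Spec_parse_about (about : String) (out : String) : Prop := out = parse_about_alt about
instance (about : String) (out : String) : Decidable (Spec_parse_about about out) := by unfold Spec_parse_about; infer_instance

-- ===== CLAIM (what is proved, stated in full; the proofs are below) =====
def Claim_equal_parse_about : Prop := ∀ (about : String), Dom_parse_about about → Spec_parse_about about (parse_about about)

-- ===== LEMMAS AND PROOFS =====

-- A's guarded remove is exactly List.erase (erase is the identity when the element is absent)
lemma stepA_eq_erase (ls : List String) (i : String) :
    (if ls.contains i then (PySem.List.remove? ls i).getD ls else ls) = ls.erase i := by
  by_cases h : i ∈ ls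
  · rw [if_pos (List.contains_iff_mem.mpr h), PySem.List.remove?_eq_some_erase _ _ h]
    rfl
  · rw [if_neg (by simpa using h), List.erase_of_not_mem h]

lemma foldl_erase_nil (S : List String) : S.foldl (fun ls i => ls.erase i) [] = [] := by
  induction S with
  | nil => rfl
  | cons t S ih => simpa using ih

lemma foldl_erase_cons_of_not_mem (S : List String) (x : String) (xs : List String)
    (hx : x ∉ S) :
    S.foldl (fun ls i => ls.erase i) (x :: xs) = x :: S.foldl (fun ls i => ls.erase i) xs := by
  induction S generalizing xs with
  | nil => rfl
  | cons t S ih =>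
    have hne : x ≠ t := fun h => hx (h ▸ List.mem_cons_self ..)
    simp only [List.foldl_cons, List.erase_cons, beq_iff_eq, if_neg hne]
    exact ih _ (fun h => hx (List.mem_cons_of_mem _ h))

lemma foldl_erase_cons_of_mem (S : List String) (x : String) (xs : List String)
    (hnd : S.Nodup) (hx : x ∈ S) :
    S.foldl (fun ls i => ls.erase i) (x :: xs) = (S.erase x).foldl (fun ls i => ls.erase i) xs := by
  induction S generalizing xs with
  | nil => cases hx
  | cons t S ih =>
    by_cases hxt : x = t
    · subst hxt
      simp
    · have hxS : x ∈ S := by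
        rcases List.mem_cons.mp hx with h | h
        · exact absurd h hxt
        · exact h
      simp only [List.foldl_cons, List.erase_cons, beq_iff_eq, if_neg hxt,
        if_neg (fun (h : t = x) => hxt h.symm)]
      exact ih _ (List.nodup_cons.mp hnd).2 hxS

-- B's single pass computes A's fold of erasures, for any Nodup target set
lemma keepLines_eq_foldl_erase (lines : List String) (S : PySem.Set String)
    (hnd : S.Nodup) :
    keepLines lines S = S.foldl (fun ls i => ls.erase i) lines := by
  induction lines generalizing S with
  | nil => simp [keepLines, foldl_erase_nil]
  | cons x xs ih =>
    by_cases hx : x ∈ S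
    · have hc : PySem.Set.contains S x = true := by
        simpa [PySem.Set.contains] using hx
      have hdis : PySem.Set.discard S x = S.erase x := by
        simpa [PySem.Set.discard] using (List.Nodup.erase_eq_filter hnd x).symm
      rw [keepLines, if_pos hc, hdis, ih _ (hnd.erase x),
        foldl_erase_cons_of_mem S x xs hnd hx]
    · have hc : PySem.Set.contains S x = false := by
        simpa [PySem.Set.contains] using hx
      rw [keepLines, if_neg (by simpa using hx), ih _ hnd,
        foldl_erase_cons_of_not_mem S x xs hx]


lemma unwanted_shit_nodup : unwanted_shit.Nodup := by decide

-- ===== VERDICT (by name: the statement is the Claim_ definition above) =====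
theorem parse_about_spec : Claim_equal_parse_about := by
  intro about _
  have key : ∀ lines : List String,
      unwanted_shit.foldl (fun ls i => if ls.contains i then (PySem.List.remove? ls i).getD ls else ls) lines
        = keepLines lines (PySem.Set.ofList unwanted_shit) := by
    intro lines
    rw [keepLines_eq_foldl_erase _ _ (PySem.Set.nodup_ofList _),
      PySem.Set.ofList_eq_self_of_nodup _ unwanted_shit_nodup]
    have hfun : (fun (ls : List String) (i : String) =>
        if ls.contains i then (PySem.List.remove? ls i).getD ls else ls)
        = fun ls i => ls.erase i :=
      funext fun ls => funext fun i => stepA_eq_erase ls i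
    rw [hfun]
  show parse_about about = parse_about_alt about
  simp only [parse_about, parse_about_alt]
  exact congrArg _ (key _)
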